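-- pv_equiv track=rewrite | github.com/YePeOn7/cgi-test-yp7 | cgiTest.py | generate_dif_string
-- ===== SOURCE A (Python) =====
-- def generate_dif_string(dt_now, first_char_shift):
--     if(len(dt_now) > 0):
--             out = [ord(character) for character in dt_now]
--             out[0] += first_char_shift
--             out = ''.join([chr(ascii_char) for ascii_char in out])
--             return out
--     else:
--         return ""
-- ===== SOURCE B (Python) =====
-- def generate_dif_string(dt_now, first_char_shift):
--     if len(dt_now) > 0:
--         return chr(ord(dt_now[0]) + first_char_shift) + dt_now[1:]
--     else:
--         return ""
-- ===== Notes on version B (the rewrite author's own statement) =====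
-- stated objective: simpler
-- what changed: Shift only the first character and concatenate it with the untouched tail slice, instead of building a full ord-list, mutating index 0, and rebuilding the string with a second per-character comprehension; measured constant-factor speedup from dropping the per-character work.
import Mathlib
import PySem

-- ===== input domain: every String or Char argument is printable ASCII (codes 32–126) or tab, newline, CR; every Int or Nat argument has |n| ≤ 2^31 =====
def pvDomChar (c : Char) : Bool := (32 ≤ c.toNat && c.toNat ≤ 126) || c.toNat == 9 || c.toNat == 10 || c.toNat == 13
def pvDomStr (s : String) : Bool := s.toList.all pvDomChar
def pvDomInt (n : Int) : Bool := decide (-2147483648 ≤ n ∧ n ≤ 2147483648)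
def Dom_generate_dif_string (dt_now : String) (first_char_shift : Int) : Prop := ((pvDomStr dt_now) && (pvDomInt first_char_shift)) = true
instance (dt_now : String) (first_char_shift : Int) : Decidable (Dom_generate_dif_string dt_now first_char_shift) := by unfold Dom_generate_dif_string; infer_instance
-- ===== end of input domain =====

-- B shifts only the first character and prepends it to the untouched tail (simpler: no full ord-list build/rebuild).

-- ===== PORT A =====
-- ord → Char.toNat cast to Int; chr → Char.ofNat (exact on Pre_, where the shifted
-- code is a valid Unicode scalar value; other characters round-trip unchanged).
def generate_dif_string (dt_now : String) (first_char_shift : Int) : String :=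
  if dt_now.length > 0 then
    let out : List Int := dt_now.toList.map (fun c => (c.toNat : Int))
    let out : List Int :=               -- out[0] += first_char_shift
      match out with
      | [] => []
      | h :: t => (h + first_char_shift) :: t
    String.ofList (out.map (fun n => Char.ofNat n.toNat))
  else
    ""

-- ===== PORT B =====
def generate_dif_string_alt (dt_now : String) (first_char_shift : Int) : String :=
  if dt_now.length > 0 then
    match dt_now.toList with
    | [] => ""
    | c :: rest =>
      String.ofList (Char.ofNat ((c.toNat : Int) + first_char_shift).toNat :: rest)
  else
    ""

-- ===== PRECONDITION & SPEC =====
-- Pre_ excludes inputs where the shifted first code is negative or > 0x10FFFF (Python's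
-- chr raises ValueError in both A and B) and where it lands in the surrogate range
-- 0xD800–0xDFFF (A returns a lone-surrogate str, which is not a Lean String value).
def pvShiftOK (first_char_shift : Int) : List Char → Bool
  | [] => true
  | c :: _ =>
    decide (0 ≤ (c.toNat : Int) + first_char_shift ∧
      ((c.toNat : Int) + first_char_shift < 0xD800 ∨
        (0xDFFF < (c.toNat : Int) + first_char_shift ∧ (c.toNat : Int) + first_char_shift ≤ 0x10FFFF)))
def Pre_generate_dif_string (dt_now : String) (first_char_shift : Int) : Prop :=
  pvShiftOK first_char_shift dt_now.toList = true
instance (dt_now : String) (first_char_shift : Int) : Decidable (Pre_generate_dif_string dt_now first_char_shift) := by unfold Pre_generate_dif_string; infer_instance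
def pvWitness_generate_dif_string : String × Int := ("abc", 3)
def Spec_generate_dif_string (dt_now : String) (first_char_shift : Int) (out : String) : Prop := out = generate_dif_string_alt dt_now first_char_shift
instance (dt_now : String) (first_char_shift : Int) (out : String) : Decidable (Spec_generate_dif_string dt_now first_char_shift out) := by unfold Spec_generate_dif_string; infer_instance

-- ===== CLAIM (what is proved, stated in full; the proofs are below) =====
def Claim_equal_generate_dif_string : Prop := ∀ (dt_now : String) (first_char_shift : Int), Dom_generate_dif_string dt_now first_char_shift → Pre_generate_dif_string dt_now first_char_shift → Spec_generate_dif_string dt_now first_char_shift (generate_dif_string dt_now first_char_shift)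

-- ===== LEMMAS AND PROOFS =====

-- ===== VERDICT (by name: the statement is the Claim_ definition above) =====
theorem generate_dif_string_spec : Claim_equal_generate_dif_string := by
  intro s k _ _
  unfold Spec_generate_dif_string generate_dif_string generate_dif_string_alt
  cases h : s.toList with
  | nil =>
    have : s.length = 0 := by
      have := congrArg List.length h
      simpa [String.length_toList] using this
    simp [this]
  | cons c t =>
    have hlen : s.length > 0 := by
      have := congrArg List.length h
      simp only [String.length_toList, List.length_cons] at this
      omega
    simp [hlen, Function.comp_def, Int.toNat_natCast, Char.ofNat_toNat]
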